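-- pv_equiv track=rewrite | github.com/Justin3006/Thesis_actionable_explainability_for_ViperGPT | viper-main/prompt_editing.py | gather_modules
-- ===== SOURCE A (Python) =====
-- from typing import List
--
-- def gather_modules(code:str, exemptions:List[str]) -> List[str]:
--     """
--     Finds all defined modules in a code snippet.
--
--     :param code: Code to find modules in.
--     :param exemptions: Names of functions to not count as modules.
--     :returns: List of module names.
--     """
--     modules = []
--     lines = code.split('\n')
--
--     for line in lines:
--         if line.strip().startswith('def '):
--             start = line.find('def ') + 4
--             end = line.find('(')
--             name = line[start:end]
--             if name not in exemptions:
--                 modules.append(line[start:end])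
--     return modules
-- ===== SOURCE B (Python) =====
-- from typing import List
--
-- def gather_modules(code: str, exemptions: List[str]) -> List[str]:
--     """
--     Finds all defined modules in a code snippet.
--
--     Single character-level scan with an index pointer (no splitting into
--     lines and no per-line string surgery): at each line start skip the
--     indentation, try to match a 'def ' header, and collect the name up to
--     its opening parenthesis; a header with no parenthesis is not a
--     definition and contributes nothing.
--     """
--     modules = []
--     i, n = 0, len(code)
--     while i < n:
--         while i < n and code[i] != '\n' and code[i].isspace():
--             i += 1
--         if code.startswith('def ', i):
--             j = i + 4
--             while j < n and code[j] not in '(\n':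
--                 j += 1
--             if j < n and code[j] == '(':
--                 name = code[i + 4:j]
--                 if name not in exemptions:
--                     modules.append(name)
--             i = j
--         while i < n and code[i] != '\n':
--             i += 1
--         i += 1
--     return modules
-- ===== Notes on version B (the rewrite author's own statement) =====
-- stated objective: alternative
-- what changed: B replaces A's split-into-lines pass with strip/startswith/find/slice per line by a single character-level scan with an index pointer: skip indentation at each line start, match a 'def ' header in place, and collect the name up to its '('.
-- intended difference: On code containing a line whose stripped form starts with 'def ' but has no '(' (and whose header text minus its last character is not exempt), A's find('(') returns -1 and it appends the header text with its last character chopped off; B skips such lines, the intended behaviour since a def header without a parenthesis defines nothing. — e.g. on gather_modules("def foo\ndef g(x):", []): A returns ["fo", "g"], B returns ["g"]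
import Mathlib
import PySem

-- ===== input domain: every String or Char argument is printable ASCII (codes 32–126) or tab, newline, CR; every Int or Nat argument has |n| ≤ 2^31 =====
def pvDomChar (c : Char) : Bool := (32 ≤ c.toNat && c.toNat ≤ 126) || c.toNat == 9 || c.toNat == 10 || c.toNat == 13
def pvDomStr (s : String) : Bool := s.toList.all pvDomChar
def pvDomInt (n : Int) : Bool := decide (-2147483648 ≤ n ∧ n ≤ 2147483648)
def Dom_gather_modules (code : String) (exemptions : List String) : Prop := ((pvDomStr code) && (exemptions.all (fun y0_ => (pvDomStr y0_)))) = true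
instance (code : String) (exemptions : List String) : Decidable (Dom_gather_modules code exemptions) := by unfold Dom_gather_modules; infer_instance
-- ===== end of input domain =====

-- B replaces A's split-into-lines pass (strip/startswith/find/slice per line) by a single
-- character-level scan with an index pointer; on 'def ' headers without a '(' A returns the
-- header text minus its last character while B skips them (see D_ below).

-- ===== PORT A =====
-- per-line body of A's for-loop: strip/startswith test, find twice, slice the line
def pvALine (exemptions : List String) (modules : List String) (line : List Char) : List String :=
  if PySem.Chars.startswith (PySem.Chars.strip line) "def ".toList then
    let start := PySem.Chars.find line "def ".toList + 4
    let stop := PySem.Chars.find line ['(']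
    let name := PySem.List.slice line (some start) (some stop)
    if exemptions.contains (String.ofList name) then modules
    else modules ++ [String.ofList (PySem.List.slice line (some start) (some stop))]
  else modules

def gather_modules (code : String) (exemptions : List String) : List String :=
  (PySem.Chars.splitOn code.toList "\n".toList).foldl (pvALine exemptions) []

-- ===== PORT B =====
-- Source B's two character tests: `code[i] != '\n' and code[i].isspace()` and `code[j] not in '(\n'`
def pvWs (c : Char) : Bool := c ≠ '\n' && PySem.Chars.isspace c
def pvQ (c : Char) : Bool := !(c == '(' || c == '\n')

-- Source B's while-loop over the index pointer: the remaining characters stand for code[i:]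
def pvBLoop (exemptions : List String) (modules : List String) (cs : List Char) : List String :=
  if hcs : cs = [] then modules else
  let cs1 := cs.dropWhile pvWs
  if "def ".toList.isPrefixOf cs1 then
    let t := cs1.drop 4
    let name := t.takeWhile pvQ
    let r := t.dropWhile pvQ
    let modules' := if r.head? = some '(' then
        (if exemptions.contains (String.ofList name) then modules
         else modules ++ [String.ofList name])
      else modules
    pvBLoop exemptions modules' ((r.dropWhile (· ≠ '\n')).drop 1)
  else
    pvBLoop exemptions modules ((cs1.dropWhile (· ≠ '\n')).drop 1)
termination_by cs.length
decreasing_by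
  · have h0 : 0 < cs.length := List.length_pos_of_ne_nil hcs
    have h1 := List.length_dropWhile_le pvWs cs
    have h2 := List.length_drop (l := cs.dropWhile pvWs) (i := 4)
    have h3 := List.length_dropWhile_le pvQ ((cs.dropWhile pvWs).drop 4)
    have h4 := List.length_dropWhile_le (fun c => decide (c ≠ '\n'))
      (((cs.dropWhile pvWs).drop 4).dropWhile pvQ)
    simp only [List.length_drop]
    omega
  · have h0 : 0 < cs.length := List.length_pos_of_ne_nil hcs
    have h1 := List.length_dropWhile_le pvWs cs
    have h4 := List.length_dropWhile_le (fun c => decide (c ≠ '\n')) (cs.dropWhile pvWs)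
    simp only [List.length_drop]
    omega

def gather_modules_alt (code : String) (exemptions : List String) : List String :=
  pvBLoop exemptions [] code.toList

-- ===== PRECONDITION & SPEC =====
-- On code containing a line whose stripped form starts with 'def ' but has no '(' (and whose
-- header text minus its last character is not exempt), A's find('(') returns -1 and it appends
-- the header text with its last character chopped off; B skips such lines — the intended
-- behaviour, since a def header without a parenthesis defines nothing.
def pvQuirk (exemptions : List String) (line : List Char) : Bool :=
  PySem.Chars.startswith (PySem.Chars.strip line) "def ".toList &&
  !line.contains '(' &&
  !exemptions.contains (String.ofList (((PySem.Chars.lstrip line).drop 4).dropLast))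

def D_gather_modules (code : String) (exemptions : List String) : Prop :=
  ∃ line ∈ PySem.Chars.splitOn code.toList "\n".toList, pvQuirk exemptions line = true
instance (code : String) (exemptions : List String) : Decidable (D_gather_modules code exemptions) := by unfold D_gather_modules; infer_instance

def Spec_gather_modules (code : String) (exemptions : List String) (out : List String) : Prop := ¬ D_gather_modules code exemptions → out = gather_modules_alt code exemptions
instance (code : String) (exemptions : List String) (out : List String) : Decidable (Spec_gather_modules code exemptions out) := by unfold Spec_gather_modules; infer_instance

def pvDiffWitness_gather_modules : String × List String := ("def foo\ndef g(x):", [])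
def pvDiffWitnessOut_gather_modules : (List String) × (List String) := (["fo", "g"], ["g"])

-- ===== CLAIM (what is proved, stated in full; the proofs are below) =====
def Claim_unchanged_gather_modules : Prop := ∀ (code : String) (exemptions : List String), Dom_gather_modules code exemptions → Spec_gather_modules code exemptions (gather_modules code exemptions)
def Claim_changed_gather_modules : Prop := Dom_gather_modules (pvDiffWitness_gather_modules.1) (pvDiffWitness_gather_modules.2) ∧ D_gather_modules (pvDiffWitness_gather_modules.1) (pvDiffWitness_gather_modules.2) ∧ gather_modules (pvDiffWitness_gather_modules.1) (pvDiffWitness_gather_modules.2) = pvDiffWitnessOut_gather_modules.1 ∧ gather_modules_alt (pvDiffWitness_gather_modules.1) (pvDiffWitness_gather_modules.2) = pvDiffWitnessOut_gather_modules.2 ∧ pvDiffWitnessOut_gather_modules.1 ≠ pvDiffWitnessOut_gather_modules.2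
def Claim_exact_gather_modules : Prop := ∀ (code : String) (exemptions : List String), Dom_gather_modules code exemptions → D_gather_modules code exemptions → gather_modules code exemptions ≠ gather_modules_alt code exemptions

-- ===== LEMMAS AND PROOFS =====

-- proof-side model of splitting at '\n' (structural recursion, one char at a time)
def pvLines : List Char → List (List Char)
  | [] => [[]]
  | c :: rest =>
    if c = '\n' then [] :: pvLines rest
    else
      match pvLines rest with
      | [] => [[c]]
      | h :: t => (c :: h) :: t

lemma pvLines_ne_nil (l : List Char) : pvLines l ≠ [] := by
  cases l with
  | nil => simp [pvLines]
  | cons c rest =>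
    simp only [pvLines]
    split
    · simp
    · cases h : pvLines rest <;> simp

lemma pvSplitOn_go_eq : ∀ (fuel : Nat) (l cur : List Char) (acc : List (List Char)),
    l.length < fuel →
    PySem.Chars.splitOn.go ['\n'] fuel l cur acc =
      acc.reverse ++ (cur.reverse ++ (pvLines l).headI) :: (pvLines l).tail := by
  intro fuel
  induction fuel with
  | zero => intro l cur acc h; omega
  | succ fuel ih =>
    intro l cur acc h
    match l with
    | [] => simp [PySem.Chars.splitOn.go, pvLines]
    | c :: rest =>
      obtain ⟨h0, t0, hpl⟩ : ∃ h0 t0, pvLines rest = h0 :: t0 := by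
        cases hp : pvLines rest with
        | nil => exact absurd hp (pvLines_ne_nil rest)
        | cons a b => exact ⟨a, b, rfl⟩
      by_cases hc : c = '\n'
      · have hip : List.isPrefixOf ['\n'] (c :: rest) = true := by
          simp [List.isPrefixOf, hc]
        rw [PySem.Chars.splitOn.go, if_pos hip]
        have hrec := ih rest [] (cur.reverse :: acc) (by simp at h; omega)
        simp only [List.length_cons, List.length_nil, List.drop_succ_cons, List.drop_zero]
        rw [hrec]
        subst hc
        simp [pvLines, hpl]
      · have hip : List.isPrefixOf ['\n'] (c :: rest) = false := by
          simp [List.isPrefixOf]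
          exact fun hx => absurd hx.symm hc
        rw [PySem.Chars.splitOn.go, if_neg (by simp [hip])]
        rw [ih rest (c :: cur) acc (by simp at h; omega)]
        simp [pvLines, hc, hpl]

lemma pvSplitOn_eq (l : List Char) : PySem.Chars.splitOn l ['\n'] = pvLines l := by
  obtain ⟨h0, t0, hpl⟩ : ∃ h0 t0, pvLines l = h0 :: t0 := by
    cases hp : pvLines l with
    | nil => exact absurd hp (pvLines_ne_nil l)
    | cons a b => exact ⟨a, b, rfl⟩
  rw [PySem.Chars.splitOn, pvSplitOn_go_eq (l.length + 1) l [] [] (by omega)]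
  simp [hpl]

lemma pvInfix_singleton (a : Char) (l : List Char) : [a] <:+: l ↔ a ∈ l := by
  constructor
  · rintro ⟨s, t, rfl⟩; simp
  · intro h
    obtain ⟨s, t, rfl⟩ := List.append_of_mem h
    exact ⟨s, t, by simp⟩

lemma pvFind_eq_of (s sub : List Char) (n : Nat) (h1 : sub <+: s.drop n)
    (h2 : ∀ i, i < n → ¬ sub <+: s.drop i) : PySem.Chars.find s sub = (n : Int) := by
  have hinf : sub <:+: s := by
    obtain ⟨t, ht⟩ := h1
    exact ⟨s.take n, t, by rw [List.append_assoc, ht, List.take_append_drop]⟩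
  have hpos : 0 ≤ PySem.Chars.find s sub := (PySem.Chars.find_nonneg_iff s sub).mpr hinf
  obtain ⟨hp, hmin⟩ := PySem.Chars.find_spec hpos
  have hfn : (PySem.Chars.find s sub).toNat = n := by
    rcases lt_trichotomy (PySem.Chars.find s sub).toNat n with h|h|h
    · exact absurd hp (h2 _ h)
    · exact h
    · exact absurd h1 (hmin n h)
  omega

lemma pvLines_no_nl (l : List Char) (h : '\n' ∉ l) : pvLines l = [l] := by
  induction l with
  | nil => rfl
  | cons c rest ih =>
    have hc : c ≠ '\n' := fun hc => h (by simp [hc])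
    have hr : pvLines rest = [rest] := ih (fun hm => h (List.mem_cons_of_mem _ hm))
    simp [pvLines, hc, hr]

lemma pvLines_append (L T : List Char) (h : '\n' ∉ L) :
    pvLines (L ++ '\n' :: T) = L :: pvLines T := by
  induction L with
  | nil => simp [pvLines]
  | cons c L' ih =>
    have hc : c ≠ '\n' := fun hc => h (by simp [hc])
    have hr := ih (fun hm => h (List.mem_cons_of_mem _ hm))
    simp only [List.cons_append, pvLines, if_neg hc, hr]

lemma pvLines_mem_no_nl : ∀ (cs l : List Char), l ∈ pvLines cs → '\n' ∉ l := by
  intro cs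
  induction cs with
  | nil => intro l hl; simp [pvLines] at hl; simp [hl]
  | cons c rest ih =>
    intro l hl
    by_cases hc : c = '\n'
    · rw [pvLines, if_pos hc] at hl
      rcases List.mem_cons.mp hl with h | h
      · simp [h]
      · exact ih l h
    · rw [pvLines, if_neg hc] at hl
      obtain ⟨h0, t0, hpl⟩ : ∃ h0 t0, pvLines rest = h0 :: t0 := by
        cases hp : pvLines rest with
        | nil => exact absurd hp (pvLines_ne_nil rest)
        | cons a b => exact ⟨a, b, rfl⟩
      rw [hpl] at hl
      rcases List.mem_cons.mp hl with h | h
      · subst h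
        intro hm
        rcases List.mem_cons.mp hm with h' | h'
        · exact hc h'.symm
        · exact ih h0 (hpl ▸ List.mem_cons_self) h'
      · exact ih l (hpl ▸ List.mem_cons_of_mem _ h)

-- takeWhile/dropWhile stop at the first '\n' when the predicate rejects '\n'
lemma pvTakeWhile_nl (p : Char → Bool) (hp : p '\n' = false) (xs ys : List Char) :
    (xs ++ '\n' :: ys).takeWhile p = xs.takeWhile p := by
  induction xs with
  | nil => simp [List.takeWhile, hp]
  | cons c xs' ih =>
    simp only [List.cons_append, List.takeWhile]
    cases p c <;> simp [ih]

lemma pvDropWhile_nl (p : Char → Bool) (hp : p '\n' = false) (xs ys : List Char) :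
    (xs ++ '\n' :: ys).dropWhile p = xs.dropWhile p ++ '\n' :: ys := by
  induction xs with
  | nil => simp [List.dropWhile, hp]
  | cons c xs' ih =>
    simp only [List.cons_append, List.dropWhile]
    cases p c <;> simp [ih]

lemma pvPrefix_nl_mp : ∀ (xs p ys : List Char), '\n' ∉ p → p <+: xs ++ '\n' :: ys → p <+: xs := by
  intro xs
  induction xs with
  | nil =>
    intro p ys hp h
    match p, h with
    | [], _ => exact List.nil_prefix
    | c :: p', h =>
      have hc : c = '\n' := (List.cons_prefix_cons.mp h).1
      exact absurd (by simp [hc]) hp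
  | cons x xs' ih =>
    intro p ys hp h
    match p with
    | [] => exact List.nil_prefix
    | c :: p' =>
      obtain ⟨hc, h'⟩ := List.cons_prefix_cons.mp h
      exact List.cons_prefix_cons.mpr ⟨hc, ih p' ys (fun hm => hp (List.mem_cons_of_mem _ hm)) h'⟩

-- on a '\n'-free list the intra-line whitespace test pvWs is just isspace
lemma pvDropWhile_ws (l : List Char) (h : '\n' ∉ l) :
    l.dropWhile pvWs = l.dropWhile PySem.Chars.isspace := by
  induction l with
  | nil => rfl
  | cons c l' ih =>
    have hc : c ≠ '\n' := fun hc => h (by simp [hc])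
    have hws : pvWs c = PySem.Chars.isspace c := by simp [pvWs, hc]
    simp only [List.dropWhile, hws]
    cases PySem.Chars.isspace c
    · rfl
    · exact ih (fun hm => h (List.mem_cons_of_mem _ hm))

-- a non-space character survives dropWhile isspace (used to carry '(' into rstrip)
lemma pvMem_dropWhile (x : Char) (l : List Char) (hx : PySem.Chars.isspace x = false)
    (h : x ∈ l) : x ∈ l.dropWhile PySem.Chars.isspace := by
  induction l with
  | nil => cases h
  | cons c l' ih =>
    by_cases hc : PySem.Chars.isspace c = true
    · rw [List.dropWhile_cons_of_pos hc]
      rcases List.mem_cons.mp h with h' | h'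
      · exact absurd (h' ▸ hc) (by simp [hx])
      · exact ih h'
    · rw [List.dropWhile_cons_of_neg hc]
      exact h

-- scanning for the first '(' on a '\n'-free list: takeWhile/dropWhile at pvQ are take/drop
-- at the position given by find_spec
lemma pvScan_eq : ∀ (l : List Char) (j : Nat), ['('] <+: l.drop j →
    (∀ i, i < j → ¬ ['('] <+: l.drop i) → '\n' ∉ l →
    l.takeWhile pvQ = l.take j ∧ l.dropWhile pvQ = l.drop j := by
  intro l
  induction l with
  | nil =>
    intro j h1 _ _
    rw [List.drop_nil] at h1
    exact absurd h1 (by simp)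
  | cons c l' ih =>
    intro j h1 h2 hnl
    match j with
    | 0 =>
      have hc : c = '(' := ((List.cons_prefix_cons.mp h1).1).symm
      subst hc
      constructor
      · rw [List.takeWhile_cons_of_neg (by simp [pvQ]), List.take_zero]
      · rw [List.dropWhile_cons_of_neg (by simp [pvQ]), List.drop_zero]
    | j' + 1 =>
      have hc1 : ¬ ['('] <+: (c :: l') := h2 0 (by omega)
      have hc : c ≠ '(' := fun hc => hc1 (by simp [hc, List.cons_prefix_cons])
      have hcn : c ≠ '\n' := fun hc => hnl (by simp [hc])
      have hq : pvQ c = true := by simp [pvQ, hc, hcn]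
      have hrec := ih j' h1 (fun i hi => h2 (i + 1) (by omega))
        (fun hm => hnl (List.mem_cons_of_mem _ hm))
      constructor
      · rw [List.takeWhile_cons_of_pos hq, List.take_succ_cons, hrec.1]
      · rw [List.dropWhile_cons_of_pos hq, List.drop_succ_cons, hrec.2]

-- B's per-line effect: what pvBLoop does between two newlines, as a fold step
def pvBStep (exemptions : List String) (modules : List String) (line : List Char) : List String :=
  if "def ".toList.isPrefixOf (line.dropWhile pvWs) then
    (if (((line.dropWhile pvWs).drop 4).dropWhile pvQ).head? = some '(' then
       (if exemptions.contains (String.ofList (((line.dropWhile pvWs).drop 4).takeWhile pvQ)) then modules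
        else modules ++ [String.ofList (((line.dropWhile pvWs).drop 4).takeWhile pvQ)])
     else modules)
  else modules

lemma pvBLoop_nil (ex ms : List String) : pvBLoop ex ms [] = ms := by
  rw [pvBLoop]
  simp

lemma pvBLoop_cons (ex ms : List String) (cs : List Char) (hne : cs ≠ []) :
    pvBLoop ex ms cs =
      if "def ".toList.isPrefixOf (cs.dropWhile pvWs) then
        pvBLoop ex
          (if (((cs.dropWhile pvWs).drop 4).dropWhile pvQ).head? = some '(' then
             (if ex.contains (String.ofList (((cs.dropWhile pvWs).drop 4).takeWhile pvQ)) then ms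
              else ms ++ [String.ofList (((cs.dropWhile pvWs).drop 4).takeWhile pvQ)])
           else ms)
          (((((cs.dropWhile pvWs).drop 4).dropWhile pvQ).dropWhile (fun c => decide (c ≠ '\n'))).drop 1)
      else
        pvBLoop ex ms (((cs.dropWhile pvWs).dropWhile (fun c => decide (c ≠ '\n'))).drop 1) := by
  rw [pvBLoop, dif_neg hne]

lemma pvNoNl_dropWhile_nl_eq_nil (l : List Char) (h : '\n' ∉ l) :
    l.dropWhile (fun c => decide (c ≠ '\n')) = [] := by
  rw [List.dropWhile_eq_nil_iff]
  intro x hx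
  simp
  exact fun hxe => h (hxe ▸ hx)

lemma pvBLoop_eq (ex : List String) : ∀ (n : Nat) (cs : List Char), cs.length ≤ n →
    ∀ ms, pvBLoop ex ms cs = (pvLines cs).foldl (pvBStep ex) ms := by
  intro n
  induction n with
  | zero =>
    intro cs hcs ms
    have h0 : cs = [] := List.eq_nil_of_length_eq_zero (by omega)
    subst h0
    rw [pvBLoop_nil]
    simp [pvLines, pvBStep]
  | succ n ih =>
    intro cs hcs ms
    by_cases hne : cs = []
    · subst hne
      rw [pvBLoop_nil]
      simp [pvLines, pvBStep]
    have hdec : cs = cs.takeWhile (fun c => decide (c ≠ '\n')) ++ cs.dropWhile (fun c => decide (c ≠ '\n')) :=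
      (List.takeWhile_append_dropWhile).symm
    have hLnl : '\n' ∉ cs.takeWhile (fun c => decide (c ≠ '\n')) := by
      intro hm
      have := List.mem_takeWhile_imp hm
      simp at this
    cases hR : cs.dropWhile (fun c => decide (c ≠ '\n')) with
    | nil =>
      -- no newline in cs: a single line
      have hcsL : cs = cs.takeWhile (fun c => decide (c ≠ '\n')) := by
        conv_lhs => rw [hdec]
        rw [hR, List.append_nil]
      have hnl : '\n' ∉ cs := fun hm => hLnl (hcsL ▸ hm)
      rw [pvLines_no_nl cs hnl, List.foldl_cons, List.foldl_nil]
      have hsub1 : '\n' ∉ cs.dropWhile pvWs :=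
        fun hm => hnl ((List.dropWhile_sublist _).mem hm)
      have hsub2 : '\n' ∉ ((cs.dropWhile pvWs).drop 4).dropWhile pvQ := fun hm =>
        hsub1 ((List.drop_sublist _ _).mem ((List.dropWhile_sublist _).mem hm))
      rw [pvBLoop_cons ex ms cs hne]
      simp only [pvBStep]
      by_cases hpre : "def ".toList.isPrefixOf (cs.dropWhile pvWs) = true
      · rw [if_pos hpre, if_pos hpre, pvNoNl_dropWhile_nl_eq_nil _ hsub2, List.drop_nil, pvBLoop_nil]
      · rw [if_neg hpre, if_neg hpre, pvNoNl_dropWhile_nl_eq_nil _ hsub1, List.drop_nil, pvBLoop_nil]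
    | cons c T =>
      have hc : c = '\n' := by
        have := List.head?_dropWhile_not (fun c => decide (c ≠ '\n')) cs
        rw [hR] at this
        simp at this
        exact this
      subst hc
      have hcs' : cs = cs.takeWhile (fun c => decide (c ≠ '\n')) ++ '\n' :: T := by
        conv_lhs => rw [hdec]
        rw [hR]
      generalize hLg : cs.takeWhile (fun c => decide (c ≠ '\n')) = L at hcs' hLnl
      have hlines : pvLines cs = L :: pvLines T := by
        rw [hcs']
        exact pvLines_append L T hLnl
      have hTlen : T.length ≤ n := by
        have : cs.length = L.length + 1 + T.length := by rw [hcs']; simp; omega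
        omega
      rw [hlines, List.foldl_cons, ← ih T hTlen]
      rw [pvBLoop_cons ex ms cs hne]
      have hL1 : cs.dropWhile pvWs = L.dropWhile pvWs ++ '\n' :: T := by
        rw [hcs']
        exact pvDropWhile_nl pvWs (by simp [pvWs]) L T
      have hL1nl : '\n' ∉ L.dropWhile pvWs := fun hm => hLnl ((List.dropWhile_sublist _).mem hm)
      simp only [pvBStep]
      by_cases hpre : "def ".toList.isPrefixOf (L.dropWhile pvWs) = true
      · have hpre' : "def ".toList.isPrefixOf (cs.dropWhile pvWs) = true := by
          rw [hL1]
          exact List.isPrefixOf_iff_prefix.mpr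
            ((List.isPrefixOf_iff_prefix.mp hpre).trans (List.prefix_append _ _))
        have hlen4 : 4 ≤ (L.dropWhile pvWs).length :=
          (List.isPrefixOf_iff_prefix.mp hpre).length_le
        have ht : (cs.dropWhile pvWs).drop 4 = (L.dropWhile pvWs).drop 4 ++ '\n' :: T := by
          rw [hL1, List.drop_append_of_le_length hlen4]
        have hname : ((cs.dropWhile pvWs).drop 4).takeWhile pvQ = ((L.dropWhile pvWs).drop 4).takeWhile pvQ := by
          rw [ht]
          exact pvTakeWhile_nl pvQ (by decide) _ _
        have hr : ((cs.dropWhile pvWs).drop 4).dropWhile pvQ = ((L.dropWhile pvWs).drop 4).dropWhile pvQ ++ '\n' :: T := by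
          rw [ht]
          exact pvDropWhile_nl pvQ (by decide) _ _
        have hrLnl : '\n' ∉ ((L.dropWhile pvWs).drop 4).dropWhile pvQ := fun hm =>
          hL1nl ((List.drop_sublist _ _).mem ((List.dropWhile_sublist _).mem hm))
        have hhead : (((cs.dropWhile pvWs).drop 4).dropWhile pvQ).head? = some '(' ↔
            (((L.dropWhile pvWs).drop 4).dropWhile pvQ).head? = some '(' := by
          rw [hr]
          cases hcase : ((L.dropWhile pvWs).drop 4).dropWhile pvQ with
          | nil => simp
          | cons a t => simp
        have heol : ((((cs.dropWhile pvWs).drop 4).dropWhile pvQ).dropWhile (fun c => decide (c ≠ '\n'))).drop 1 = T := by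
          rw [hr, pvDropWhile_nl _ (by simp) _ T, pvNoNl_dropWhile_nl_eq_nil _ hrLnl,
            List.nil_append, List.drop_succ_cons, List.drop_zero]
        rw [if_pos hpre', if_pos hpre, heol, hname]
        by_cases hh : (((L.dropWhile pvWs).drop 4).dropWhile pvQ).head? = some '('
        · rw [if_pos (hhead.mpr hh), if_pos hh]
        · rw [if_neg (fun h => hh (hhead.mp h)), if_neg hh]
      · have hpre' : ¬ "def ".toList.isPrefixOf (cs.dropWhile pvWs) = true := by
          rw [hL1]
          intro h
          exact hpre (List.isPrefixOf_iff_prefix.mpr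
            (pvPrefix_nl_mp _ _ _ (by decide) (List.isPrefixOf_iff_prefix.mp h)))
        have heol : (((cs.dropWhile pvWs)).dropWhile (fun c => decide (c ≠ '\n'))).drop 1 = T := by
          rw [hL1, pvDropWhile_nl _ (by simp) _ T, pvNoNl_dropWhile_nl_eq_nil _ hL1nl,
            List.nil_append, List.drop_succ_cons, List.drop_zero]
        rw [if_neg hpre', if_neg hpre, heol]

-- the per-line steps agree on every '\n'-free line that is not a quirk line
lemma pvRstrip_prefix (l : List Char) : PySem.Chars.rstrip l <+: l := by
  have hs := List.dropWhile_suffix (l := l.reverse) PySem.Chars.isspace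
  have h2 := List.reverse_prefix.mpr hs
  simpa [PySem.Chars.rstrip] using h2

lemma pvStep_eq (ex ms : List String) (line : List Char) (hnl : '\n' ∉ line)
    (hq : ¬ pvQuirk ex line = true) : pvALine ex ms line = pvBStep ex ms line := by
  have hdw : line.dropWhile pvWs = line.dropWhile PySem.Chars.isspace := pvDropWhile_ws line hnl
  by_cases hB : "def ".toList <+: line.dropWhile PySem.Chars.isspace
  case neg =>
    have hA : ¬ PySem.Chars.startswith (PySem.Chars.strip line) "def ".toList = true := by
      intro h
      exact hB (((PySem.Chars.startswith_iff _ _).mp h).trans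
        (pvRstrip_prefix (PySem.Chars.lstrip line)))
    have hBp : ¬ "def ".toList.isPrefixOf (line.dropWhile pvWs) = true := by
      rw [hdw, List.isPrefixOf_iff_prefix]; exact hB
    simp only [pvALine, pvBStep]
    rw [if_neg hA, if_neg hBp]
  case pos =>
    obtain ⟨rest, hres⟩ := hB
    have hBp : "def ".toList.isPrefixOf (line.dropWhile pvWs) = true := by
      rw [hdw, List.isPrefixOf_iff_prefix]; exact ⟨rest, hres⟩
    have hline : line = (List.takeWhile PySem.Chars.isspace line ++ ['d','e','f',' ']) ++ rest := by
      conv_lhs => rw [← List.takeWhile_append_dropWhile (p := PySem.Chars.isspace) (l := line)]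
      rw [List.append_assoc]
      congr 1
      exact hres.symm
    set ws := List.takeWhile PySem.Chars.isspace line with hws
    have hwsp : ∀ c ∈ ws, PySem.Chars.isspace c = true := fun c hcm => List.mem_takeWhile_imp hcm
    have hXlen : (ws ++ ['d','e','f',' ']).length = ws.length + 4 := by simp
    have hdropX : List.drop (ws.length + 4) line = rest := by
      rw [hline, ← hXlen, List.drop_left]
    have hdropws : List.drop ws.length line = ['d','e','f',' '] ++ rest := by
      rw [hline, List.append_assoc, List.drop_left]
    have hlen : line.length = ws.length + 4 + rest.length := by
      rw [hline]
      simp only [List.length_append, List.length_cons, List.length_nil]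
    have hspace_head : ∀ i, i < ws.length →
        ∃ c t, List.drop i line = c :: t ∧ PySem.Chars.isspace c = true := by
      intro i hi
      refine ⟨ws[i], List.drop (i+1) ws ++ (['d','e','f',' '] ++ rest), ?_,
        hwsp _ (List.getElem_mem _)⟩
      rw [hline, List.append_assoc, List.drop_append, Nat.sub_eq_zero_of_le (le_of_lt hi),
        List.drop_zero, List.drop_eq_getElem_cons hi, List.cons_append]
    have hfdef : PySem.Chars.find line "def ".toList = (ws.length : Int) := by
      apply pvFind_eq_of
      · rw [hdropws]; exact ⟨rest, rfl⟩
      · intro i hi hpref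
        obtain ⟨ch, t, hdr, hsp⟩ := hspace_head i hi
        rw [hdr] at hpref
        rw [← (List.cons_prefix_cons.mp hpref).1] at hsp
        exact absurd hsp (by decide)
    have hrestnl : '\n' ∉ rest := fun hm => hnl (by rw [hline]; simp [hm])
    have ht4 : (line.dropWhile pvWs).drop 4 = rest := by
      rw [hdw, ← hres]
      exact List.drop_left' (by decide)
    by_cases hpar : '(' ∈ rest
    · -- a parenthesis exists: both sides collect the name before it
      have hcut : 0 ≤ PySem.Chars.find rest ['('] :=
        (PySem.Chars.find_nonneg_iff rest ['(']).mpr ((pvInfix_singleton _ _).mpr hpar)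
      obtain ⟨hp, hmin⟩ := PySem.Chars.find_spec hcut
      have hL1 : PySem.Chars.lstrip line = "def ".toList ++ rest := hres.symm
      have hA : PySem.Chars.startswith (PySem.Chars.strip line) "def ".toList = true := by
        apply (PySem.Chars.startswith_iff _ _).mpr
        have hmem : '(' ∈ PySem.Chars.rstrip (PySem.Chars.lstrip line) := by
          simp only [PySem.Chars.rstrip]
          rw [List.mem_reverse]
          exact pvMem_dropWhile '(' _ (by decide) (by rw [List.mem_reverse, hL1]; simp [hpar])
        have htk := List.prefix_iff_eq_take.mp (pvRstrip_prefix (PySem.Chars.lstrip line))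
        have h4 : 4 ≤ (PySem.Chars.rstrip (PySem.Chars.lstrip line)).length := by
          by_contra hlt
          rw [not_le] at hlt
          have hsub : PySem.Chars.rstrip (PySem.Chars.lstrip line) <+:
              (PySem.Chars.lstrip line).take 4 := by
            rw [htk]
            exact List.take_prefix_take_left (by omega)
          have hmem4 := hsub.subset hmem
          rw [hL1, List.take_left' (by decide)] at hmem4
          exact absurd hmem4 (by decide)
        have hdef4 : "def ".toList = (PySem.Chars.lstrip line).take 4 := by
          rw [hL1, List.take_left' (by decide)]
        show "def ".toList <+: PySem.Chars.strip line
        simp only [PySem.Chars.strip]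
        rw [htk, hdef4]
        exact List.take_prefix_take_left h4
      have hfpar : PySem.Chars.find line ['('] =
          ((ws.length + 4 + (PySem.Chars.find rest ['(']).toNat : Nat) : Int) := by
        apply pvFind_eq_of
        · have hd : List.drop (ws.length + 4 + (PySem.Chars.find rest ['(']).toNat) line =
              List.drop (PySem.Chars.find rest ['(']).toNat rest := by
            rw [← hdropX, List.drop_drop]
          rw [hd]
          exact hp
        · intro i hi hpref
          by_cases h1 : i < ws.length
          · obtain ⟨ch, t, hdr, hsp⟩ := hspace_head i h1
            rw [hdr] at hpref
            rw [← (List.cons_prefix_cons.mp hpref).1] at hsp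
            exact absurd hsp (by decide)
          · by_cases h2 : i < ws.length + 4
            · have hdropi : List.drop i line = List.drop (i - ws.length) (['d','e','f',' '] ++ rest) := by
                rw [← hdropws, List.drop_drop]
                congr 1
                omega
              have hj4 : i - ws.length = 0 ∨ i - ws.length = 1 ∨ i - ws.length = 2 ∨ i - ws.length = 3 := by omega
              rcases hj4 with hj|hj|hj|hj <;> rw [hj] at hdropi
              · rw [show List.drop 0 (['d','e','f',' '] ++ rest) = 'd'::'e'::'f'::' '::rest from rfl] at hdropi
                rw [hdropi] at hpref
                exact absurd (List.cons_prefix_cons.mp hpref).1 (by decide)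
              · rw [show List.drop 1 (['d','e','f',' '] ++ rest) = 'e'::'f'::' '::rest from rfl] at hdropi
                rw [hdropi] at hpref
                exact absurd (List.cons_prefix_cons.mp hpref).1 (by decide)
              · rw [show List.drop 2 (['d','e','f',' '] ++ rest) = 'f'::' '::rest from rfl] at hdropi
                rw [hdropi] at hpref
                exact absurd (List.cons_prefix_cons.mp hpref).1 (by decide)
              · rw [show List.drop 3 (['d','e','f',' '] ++ rest) = ' '::rest from rfl] at hdropi
                rw [hdropi] at hpref
                exact absurd (List.cons_prefix_cons.mp hpref).1 (by decide)
            · have hdropi : List.drop i line = List.drop (i - (ws.length + 4)) rest := by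
                rw [← hdropX, List.drop_drop]
                congr 1
                omega
              rw [hdropi] at hpref
              exact hmin _ (by omega) hpref
      have hnameA : PySem.List.slice line (some ((ws.length : Int) + 4))
          (some ((ws.length + 4 + (PySem.Chars.find rest ['(']).toNat : Nat) : Int)) =
          List.take (PySem.Chars.find rest ['(']).toNat rest := by
        have h1 : (ws.length : Int) + 4 = ((ws.length + 4 : Nat) : Int) := by push_cast; ring
        rw [h1, PySem.List.slice_natCast, hdropX]
        congr 1
        omega
      have hscan := pvScan_eq rest (PySem.Chars.find rest ['(']).toNat hp hmin hrestnl
      have hheadr : (rest.dropWhile pvQ).head? = some '(' := by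
        rw [hscan.2]
        obtain ⟨tt, htt⟩ := hp
        rw [← htt]
        rfl
      simp only [pvALine, pvBStep]
      rw [if_pos hA, if_pos hBp, ht4, hfdef, hfpar, hnameA, hscan.1, if_pos hheadr]
    · -- no parenthesis on the line: B skips it; A skips it too unless it is a quirk line
      have hrq : rest.dropWhile pvQ = [] := by
        rw [List.dropWhile_eq_nil_iff]
        intro x hx
        have hx1 : (x == '(') = false := beq_eq_false_iff_ne.mpr (fun hxe => hpar (hxe ▸ hx))
        have hx2 : (x == '\n') = false := beq_eq_false_iff_ne.mpr (fun hxe => hrestnl (hxe ▸ hx))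
        simp [pvQ, hx1, hx2]
      have hBval : pvBStep ex ms line = ms := by
        simp only [pvBStep]
        rw [if_pos hBp, ht4, hrq]
        simp
      rw [hBval]
      by_cases hA : PySem.Chars.startswith (PySem.Chars.strip line) "def ".toList = true
      case neg =>
        simp only [pvALine]
        rw [if_neg hA]
      case pos =>
        have hnotinline : '(' ∉ line := by
          rw [hline]
          intro hm
          simp only [List.mem_append, List.mem_cons, List.not_mem_nil, or_false] at hm
          rcases hm with (hm | hm) | hm
          · exact absurd (hwsp _ hm) (by decide)
          · rcases hm with hm | hm | hm | hm <;> exact absurd hm (by decide)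
          · exact hpar hm
        have hfpar : PySem.Chars.find line ['('] = -1 := by
          rw [PySem.Chars.find_eq_neg_one_iff]
          intro hinf
          exact hnotinline ((pvInfix_singleton _ _).mp hinf)
        have hnameA : PySem.List.slice line (some ((ws.length : Int) + 4)) (some (-1)) =
            List.take (rest.length - 1) rest := by
          simp only [PySem.List.slice, PySem.List.clampIdx]
          rw [if_neg (by omega : ¬ ((ws.length : Int) + 4 < 0)),
            if_pos (by omega : (-1 : Int) < 0),
            if_neg (show ¬ ((line.length : Int) + (-1) < 0) by omega)]
          have ht : ((ws.length : Int) + 4).toNat = ws.length + 4 := by omega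
          rw [ht, min_eq_left (by omega), hdropX]
          congr 1
          omega
        have hnotc : line.contains '(' = false := by
          rw [← Bool.not_eq_true]
          exact fun h => hnotinline (List.contains_iff_mem.mp h)
        have hchop : (PySem.Chars.lstrip line).drop 4 = rest := by
          simp only [PySem.Chars.lstrip]
          rw [← hres]
          exact List.drop_left' (by decide)
        have hcont : ex.contains (String.ofList (List.take (rest.length - 1) rest)) = true := by
          by_contra hcc
          rw [Bool.not_eq_true] at hcc
          apply hq
          simp only [pvQuirk]
          rw [hA, hnotc, hchop, List.dropLast_eq_take, hcc]
          rfl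
        simp only [pvALine]
        rw [if_pos hA, hfdef, hfpar, hnameA, if_pos hcont]

-- tightness: on a quirk line A emits one (chopped) name and B emits nothing
def pvAExtra (ex : List String) (line : List Char) : List String :=
  if PySem.Chars.startswith (PySem.Chars.strip line) "def ".toList then
    (if ex.contains (String.ofList (PySem.List.slice line
        (some (PySem.Chars.find line "def ".toList + 4)) (some (PySem.Chars.find line ['('])))) then []
     else [String.ofList (PySem.List.slice line
        (some (PySem.Chars.find line "def ".toList + 4)) (some (PySem.Chars.find line ['('])))])
  else []

def pvBExtra (ex : List String) (line : List Char) : List String :=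
  if "def ".toList.isPrefixOf (line.dropWhile pvWs) then
    (if (((line.dropWhile pvWs).drop 4).dropWhile pvQ).head? = some '(' then
       (if ex.contains (String.ofList (((line.dropWhile pvWs).drop 4).takeWhile pvQ)) then []
        else [String.ofList (((line.dropWhile pvWs).drop 4).takeWhile pvQ)])
     else [])
  else []

lemma pvALine_extra (ex ms : List String) (line : List Char) :
    pvALine ex ms line = ms ++ pvAExtra ex line := by
  simp only [pvALine, pvAExtra]
  split_ifs <;> simp

lemma pvBStep_extra (ex ms : List String) (line : List Char) :
    pvBStep ex ms line = ms ++ pvBExtra ex line := by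
  simp only [pvBStep, pvBExtra]
  split_ifs <;> simp

lemma pvQuirk_lens (ex : List String) (line : List Char) (hnl : '\n' ∉ line)
    (hq : pvQuirk ex line = true) :
    (pvAExtra ex line).length = 1 ∧ (pvBExtra ex line).length = 0 := by
  have hq' := hq
  simp only [pvQuirk, Bool.and_eq_true, Bool.not_eq_true'] at hq'
  obtain ⟨⟨hA, hnc⟩, hce⟩ := hq'
  have hnotinline : '(' ∉ line := by
    intro hm
    rw [List.contains_iff_mem.mpr hm] at hnc
    cases hnc
  obtain ⟨rest, hres⟩ : "def ".toList <+: line.dropWhile PySem.Chars.isspace :=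
    ((PySem.Chars.startswith_iff _ _).mp hA).trans (pvRstrip_prefix (PySem.Chars.lstrip line))
  have hline : line = (List.takeWhile PySem.Chars.isspace line ++ ['d','e','f',' ']) ++ rest := by
    conv_lhs => rw [← List.takeWhile_append_dropWhile (p := PySem.Chars.isspace) (l := line)]
    rw [List.append_assoc]
    congr 1
    exact hres.symm
  set ws := List.takeWhile PySem.Chars.isspace line with hws
  have hwsp : ∀ c ∈ ws, PySem.Chars.isspace c = true := fun c hcm => List.mem_takeWhile_imp hcm
  have hXlen : (ws ++ ['d','e','f',' ']).length = ws.length + 4 := by simp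
  have hdropX : List.drop (ws.length + 4) line = rest := by
    rw [hline, ← hXlen, List.drop_left]
  have hdropws : List.drop ws.length line = ['d','e','f',' '] ++ rest := by
    rw [hline, List.append_assoc, List.drop_left]
  have hlen : line.length = ws.length + 4 + rest.length := by
    rw [hline]
    simp only [List.length_append, List.length_cons, List.length_nil]
  have hspace_head : ∀ i, i < ws.length →
      ∃ c t, List.drop i line = c :: t ∧ PySem.Chars.isspace c = true := by
    intro i hi
    refine ⟨ws[i], List.drop (i+1) ws ++ (['d','e','f',' '] ++ rest), ?_,
      hwsp _ (List.getElem_mem _)⟩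
    rw [hline, List.append_assoc, List.drop_append, Nat.sub_eq_zero_of_le (le_of_lt hi),
      List.drop_zero, List.drop_eq_getElem_cons hi, List.cons_append]
  have hfdef : PySem.Chars.find line "def ".toList = (ws.length : Int) := by
    apply pvFind_eq_of
    · rw [hdropws]; exact ⟨rest, rfl⟩
    · intro i hi hpref
      obtain ⟨ch, t, hdr, hsp⟩ := hspace_head i hi
      rw [hdr] at hpref
      rw [← (List.cons_prefix_cons.mp hpref).1] at hsp
      exact absurd hsp (by decide)
  have hrestnl : '\n' ∉ rest := fun hm => hnl (by rw [hline]; simp [hm])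
  have hpar : '(' ∉ rest := fun hm => hnotinline (by rw [hline]; simp [hm])
  have hfpar : PySem.Chars.find line ['('] = -1 := by
    rw [PySem.Chars.find_eq_neg_one_iff]
    intro hinf
    exact hnotinline ((pvInfix_singleton _ _).mp hinf)
  have hnameA : PySem.List.slice line (some ((ws.length : Int) + 4)) (some (-1)) =
      List.take (rest.length - 1) rest := by
    simp only [PySem.List.slice, PySem.List.clampIdx]
    rw [if_neg (by omega : ¬ ((ws.length : Int) + 4 < 0)),
      if_pos (by omega : (-1 : Int) < 0),
      if_neg (show ¬ ((line.length : Int) + (-1) < 0) by omega)]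
    have ht : ((ws.length : Int) + 4).toNat = ws.length + 4 := by omega
    rw [ht, min_eq_left (by omega), hdropX]
    congr 1
    omega
  have hchop : (PySem.Chars.lstrip line).drop 4 = rest := by
    simp only [PySem.Chars.lstrip]
    rw [← hres]
    exact List.drop_left' (by decide)
  have hce' : ex.contains (String.ofList (List.take (rest.length - 1) rest)) = false := by
    rw [← List.dropLast_eq_take, ← hchop]
    exact hce
  constructor
  · simp only [pvAExtra]
    rw [if_pos hA, hfdef, hfpar, hnameA, if_neg (by rw [hce']; exact Bool.false_ne_true)]
    rfl
  · have hdw : line.dropWhile pvWs = line.dropWhile PySem.Chars.isspace := pvDropWhile_ws line hnl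
    have hBp : "def ".toList.isPrefixOf (line.dropWhile pvWs) = true := by
      rw [hdw, List.isPrefixOf_iff_prefix]; exact ⟨rest, hres⟩
    have ht4 : (line.dropWhile pvWs).drop 4 = rest := by
      rw [hdw, ← hres]
      exact List.drop_left' (by decide)
    have hrq : rest.dropWhile pvQ = [] := by
      rw [List.dropWhile_eq_nil_iff]
      intro x hx
      have hx1 : (x == '(') = false := beq_eq_false_iff_ne.mpr (fun hxe => hpar (hxe ▸ hx))
      have hx2 : (x == '\n') = false := beq_eq_false_iff_ne.mpr (fun hxe => hrestnl (hxe ▸ hx))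
      simp [pvQ, hx1, hx2]
    simp only [pvBExtra]
    rw [if_pos hBp, ht4, hrq]
    simp

lemma pvGatherA_flatMap (code : String) (exemptions : List String) :
    gather_modules code exemptions = (pvLines code.toList).flatMap (pvAExtra exemptions) := by
  unfold gather_modules
  rw [show "\n".toList = ['\n'] from rfl, pvSplitOn_eq,
    PySem.List.foldl_congr_mem _ (pvALine exemptions)
      (fun acc x => acc ++ pvAExtra exemptions x) []
      (fun acc x _ => pvALine_extra exemptions acc x),
    PySem.List.foldl_append_eq_flatMap]
  rfl

lemma pvGatherB_flatMap (code : String) (exemptions : List String) :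
    gather_modules_alt code exemptions = (pvLines code.toList).flatMap (pvBExtra exemptions) := by
  unfold gather_modules_alt
  rw [pvBLoop_eq exemptions code.toList.length code.toList (le_refl _) [],
    PySem.List.foldl_congr_mem _ (pvBStep exemptions)
      (fun acc x => acc ++ pvBExtra exemptions x) []
      (fun acc x _ => pvBStep_extra exemptions acc x),
    PySem.List.foldl_append_eq_flatMap]
  rfl

-- ===== VERDICT (by name: the statement is the Claim_ definition above) =====
theorem gather_modules_spec : Claim_unchanged_gather_modules := by
  intro code exemptions _ hnD
  unfold gather_modules gather_modules_alt
  rw [show "\n".toList = ['\n'] from rfl, pvSplitOn_eq,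
    pvBLoop_eq exemptions code.toList.length code.toList (le_refl _) []]
  apply PySem.List.foldl_congr_mem
  intro acc x hx
  apply pvStep_eq
  · exact pvLines_mem_no_nl code.toList x hx
  · intro hqk
    exact hnD ⟨x, by rw [show "\n".toList = ['\n'] from rfl, pvSplitOn_eq]; exact hx, hqk⟩

theorem gather_modules_changed : Claim_changed_gather_modules := by
  unfold Claim_changed_gather_modules
  refine ⟨by decide, by decide, by decide, ?_, by decide⟩
  show gather_modules_alt "def foo\ndef g(x):" [] = ["g"]
  unfold gather_modules_alt
  rw [pvBLoop_eq [] ("def foo\ndef g(x):".toList.length) ("def foo\ndef g(x):".toList)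
    (le_refl _) []]
  decide

theorem gather_modules_tight : Claim_exact_gather_modules := by
  intro code exemptions _ hD
  obtain ⟨line0, hmem0, hq0⟩ := hD
  rw [show "\n".toList = ['\n'] from rfl, pvSplitOn_eq] at hmem0
  intro heq
  rw [pvGatherA_flatMap, pvGatherB_flatMap] at heq
  have hlen := congrArg List.length heq
  rw [List.length_flatMap, List.length_flatMap] at hlen
  have hlt : ((pvLines code.toList).map (fun l => (pvBExtra exemptions l).length)).sum <
      ((pvLines code.toList).map (fun l => (pvAExtra exemptions l).length)).sum := by
    apply List.sum_lt_sum
    · intro l hl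
      by_cases hql : pvQuirk exemptions l = true
      · obtain ⟨h1, h2⟩ := pvQuirk_lens exemptions l (pvLines_mem_no_nl code.toList l hl) hql
        omega
      · have hstep := pvStep_eq exemptions [] l (pvLines_mem_no_nl code.toList l hl) hql
        rw [pvALine_extra, pvBStep_extra, List.nil_append, List.nil_append] at hstep
        rw [hstep]
    · refine ⟨line0, hmem0, ?_⟩
      obtain ⟨h1, h2⟩ := pvQuirk_lens exemptions line0 (pvLines_mem_no_nl code.toList line0 hmem0) hq0
      omega
  omega
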